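-- pv_equiv track=rewrite | github.com/darsh1612/Webscrapping | savana.py | extract_title_from_text
-- ===== SOURCE A (Python) =====
-- def extract_title_from_text(text):
--     """Extract title from card text"""
--     if not text or len(text) < 5:
--         return "No title"
--
--     # Split text into lines and find the title
--     lines = [line.strip() for line in text.split('\n') if line.strip()]
--
--     for line in lines:
--         # Skip lines that look like prices
--         if any(curr in line for curr in ['₹', 'Rs', '$']):
--             continue
--
--         # Skip very short lines or navigation text
--         if len(line) < 5 or any(skip in line.lower() for skip in [
--             'new', 'sale', 'off', '%', 'free', 'shipping'
--         ]):
--             continue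
--
--         # This line is likely the title
--         if len(line) > 5 and len(line) < 200:
--             return line
--
--     # Fallback: use first meaningful line
--     for line in lines:
--         if len(line) > 5 and len(line) < 200:
--             return line
--
--     return "No title"
-- ===== SOURCE B (Python) =====
-- def extract_title_from_text(text):
--     """Extract title from card text (single pass with a first-fallback accumulator)."""
--     if not text or len(text) < 5:
--         return "No title"
--     fallback = None
--     for raw in text.split('\n'):
--         line = raw.strip()
--         if not line:
--             continue
--         n = len(line)
--         if 5 < n < 200:
--             if not ('\u20b9' in line or 'Rs' in line or '$' in line):
--                 low = line.lower()
--                 if not ('new' in low or 'sale' in low or 'off' in low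
--                         or '%' in low or 'free' in low or 'shipping' in low):
--                     return line
--             if fallback is None:
--                 fallback = line
--     return fallback if fallback is not None else "No title"
-- ===== Notes on version B (the rewrite author's own statement) =====
-- stated objective: simpler
-- what changed: Replaces A's build-a-filtered-list-then-two-sequential-scans with one streaming pass over the split lines that returns a full-match line immediately and keeps only the first 5<len<200 line as a fallback accumulator.
import Mathlib
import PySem

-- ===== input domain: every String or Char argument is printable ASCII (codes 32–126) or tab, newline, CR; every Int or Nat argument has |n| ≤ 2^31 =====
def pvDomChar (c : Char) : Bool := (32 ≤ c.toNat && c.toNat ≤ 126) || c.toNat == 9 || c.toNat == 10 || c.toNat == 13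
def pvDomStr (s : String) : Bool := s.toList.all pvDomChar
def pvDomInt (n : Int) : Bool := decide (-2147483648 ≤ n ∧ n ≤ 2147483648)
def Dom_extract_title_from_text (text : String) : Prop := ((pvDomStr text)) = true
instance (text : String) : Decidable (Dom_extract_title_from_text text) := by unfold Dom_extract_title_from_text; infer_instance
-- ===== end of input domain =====

-- B replaces A's filtered-list + two sequential scans by one streaming pass with a first-fallback accumulator (objective: simpler).


-- ===== PORT A =====
-- any(curr in line for curr in ['₹', 'Rs', '$'])
def pvPrice (l : List Char) : Bool :=
  ["₹".toList, "Rs".toList, "$".toList].any (fun c => PySem.Chars.isIn c l)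

-- any(skip in line.lower() for skip in ['new','sale','off','%','free','shipping'])
def pvSkip (l : List Char) : Bool :=
  ["new".toList, "sale".toList, "off".toList, "%".toList, "free".toList, "shipping".toList].any
    (fun w => PySem.Chars.isIn w (PySem.Chars.lower l))

-- A's first loop: return the first line that is not a price line, not short/navigation, and 5 < len < 200
def pvLoop1 : List (List Char) → Option (List Char)
  | [] => none
  | l :: rest =>
    if pvPrice l = true then pvLoop1 rest
    else if l.length < 5 ∨ pvSkip l = true then pvLoop1 rest
    else if 5 < l.length ∧ l.length < 200 then some l
    else pvLoop1 rest

-- A's fallback loop: first line with 5 < len < 200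
def pvLoop2 : List (List Char) → Option (List Char)
  | [] => none
  | l :: rest => if 5 < l.length ∧ l.length < 200 then some l else pvLoop2 rest

def extract_title_from_text (text : String) : String :=
  if text.toList = [] ∨ text.toList.length < 5 then "No title"
  else
    let lines := (((PySem.Chars.split? text.toList ['\n']).getD []).map PySem.Chars.strip).filter
      (fun l => !l.isEmpty)
    match pvLoop1 lines with
    | some l => String.ofList l
    | none =>
      match pvLoop2 lines with
      | some l => String.ofList l
      | none => "No title"

-- ===== PORT B =====
def pvPriceB (l : List Char) : Bool :=
  PySem.Chars.isIn "₹".toList l || PySem.Chars.isIn "Rs".toList l || PySem.Chars.isIn "$".toList l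

def pvSkipB (l : List Char) : Bool :=
  PySem.Chars.isIn "new".toList (PySem.Chars.lower l) || PySem.Chars.isIn "sale".toList (PySem.Chars.lower l) ||
  PySem.Chars.isIn "off".toList (PySem.Chars.lower l) || PySem.Chars.isIn "%".toList (PySem.Chars.lower l) ||
  PySem.Chars.isIn "free".toList (PySem.Chars.lower l) || PySem.Chars.isIn "shipping".toList (PySem.Chars.lower l)

-- B's single pass: strip each raw line, return the first full match, remember the first fallback
def pvScan : List (List Char) → Option (List Char) → String
  | [], fb => match fb with | some f => String.ofList f | none => "No title"
  | raw :: rest, fb =>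
    if PySem.Chars.strip raw = [] then pvScan rest fb
    else if 5 < (PySem.Chars.strip raw).length ∧ (PySem.Chars.strip raw).length < 200 then
      if pvPriceB (PySem.Chars.strip raw) = false ∧ pvSkipB (PySem.Chars.strip raw) = false then
        String.ofList (PySem.Chars.strip raw)
      else pvScan rest (if fb = none then some (PySem.Chars.strip raw) else fb)
    else pvScan rest fb

def extract_title_from_text_alt (text : String) : String :=
  if text.toList = [] ∨ text.toList.length < 5 then "No title"
  else pvScan ((PySem.Chars.split? text.toList ['\n']).getD []) none

-- ===== PRECONDITION & SPEC =====
def Spec_extract_title_from_text (text : String) (out : String) : Prop := out = extract_title_from_text_alt text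
instance (text : String) (out : String) : Decidable (Spec_extract_title_from_text text out) := by unfold Spec_extract_title_from_text; infer_instance

-- ===== CLAIM (what is proved, stated in full; the proofs are below) =====
def Claim_equal_extract_title_from_text : Prop := ∀ (text : String), Dom_extract_title_from_text text → Spec_extract_title_from_text text (extract_title_from_text text)

-- ===== LEMMAS AND PROOFS =====
def pvLines (raws : List (List Char)) : List (List Char) :=
  (raws.map PySem.Chars.strip).filter (fun l => !l.isEmpty)

def pvRes (L : List (List Char)) (fb : Option (List Char)) : String :=
  match pvLoop1 L with
  | some l => String.ofList l
  | none =>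
    match fb with
    | some f => String.ofList f
    | none =>
      match pvLoop2 L with
      | some l => String.ofList l
      | none => "No title"

lemma priceB_eq (l : List Char) : pvPriceB l = pvPrice l := by
  simp [pvPriceB, pvPrice, List.any, Bool.or_assoc]

lemma skipB_eq (l : List Char) : pvSkipB l = pvSkip l := by
  simp [pvSkipB, pvSkip, List.any, Bool.or_assoc]

lemma scan_eq (raws : List (List Char)) : ∀ fb, pvScan raws fb = pvRes (pvLines raws) fb := by
  induction raws with
  | nil => intro fb; cases fb <;> rfl
  | cons raw rest ih =>
    intro fb
    by_cases he : PySem.Chars.strip raw = []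
    · have h1 : pvLines (raw :: rest) = pvLines rest := by
        simp [pvLines, he]
      rw [h1, ← ih fb]
      simp [pvScan, he]
    · have h1 : pvLines (raw :: rest) = PySem.Chars.strip raw :: pvLines rest := by
        simp [pvLines, he]
      rw [h1]
      by_cases hr : 5 < (PySem.Chars.strip raw).length ∧ (PySem.Chars.strip raw).length < 200
      · by_cases hok : pvPrice (PySem.Chars.strip raw) = false ∧ pvSkip (PySem.Chars.strip raw) = false
        · -- full match: both return it
          have h5 : ¬ (PySem.Chars.strip raw).length < 5 := by omega
          have hA : pvLoop1 (PySem.Chars.strip raw :: pvLines rest) = some (PySem.Chars.strip raw) := by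
            simp [pvLoop1, hok.1, hok.2, h5, hr]
          simp [pvScan, he, hr, priceB_eq, skipB_eq, hok.1, hok.2, pvRes, hA]
        · -- price or skip: loop1 skips, loop2 takes it, B stores fallback
          have hA : pvLoop1 (PySem.Chars.strip raw :: pvLines rest) = pvLoop1 (pvLines rest) := by
            by_cases hp : pvPrice (PySem.Chars.strip raw) = true
            · simp [pvLoop1, hp]
            · have hp' : pvPrice (PySem.Chars.strip raw) = false := by
                revert hp; cases pvPrice (PySem.Chars.strip raw) <;> simp
              have hs : pvSkip (PySem.Chars.strip raw) = true := by
                cases hsk : pvSkip (PySem.Chars.strip raw) with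
                | true => rfl
                | false => exact absurd ⟨hp', hsk⟩ hok
              simp [pvLoop1, hp', hs]
          have hB : pvLoop2 (PySem.Chars.strip raw :: pvLines rest) = some (PySem.Chars.strip raw) := by
            simp [pvLoop2, hr]
          have hne : ¬ (pvPriceB (PySem.Chars.strip raw) = false ∧ pvSkipB (PySem.Chars.strip raw) = false) := by
            rw [priceB_eq, skipB_eq]; exact hok
          have hL : pvScan (raw :: rest) fb = pvScan rest (if fb = none then some (PySem.Chars.strip raw) else fb) := by
            simp [pvScan, he, hr, hne]
          rw [hL, ih]
          cases fb with
          | none => simp [pvRes, hA, hB]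
          | some f => simp [pvRes, hA]
      · -- out of size range: both skip (loop1's own branches all continue)
        have hA : pvLoop1 (PySem.Chars.strip raw :: pvLines rest) = pvLoop1 (pvLines rest) := by
          simp only [pvLoop1]
          split_ifs <;> rfl
        have hB : pvLoop2 (PySem.Chars.strip raw :: pvLines rest) = pvLoop2 (pvLines rest) := by
          simp [pvLoop2, hr]
        have hL : pvScan (raw :: rest) fb = pvScan rest fb := by
          simp [pvScan, he, hr]
        rw [hL, ih]
        simp [pvRes, hA, hB]

-- ===== VERDICT (by name: the statement is the Claim_ definition above) =====
theorem extract_title_from_text_spec : Claim_equal_extract_title_from_text := by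
  intro text _
  unfold Spec_extract_title_from_text extract_title_from_text extract_title_from_text_alt
  split_ifs with hg
  · rfl
  · rw [scan_eq]
    rfl
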